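-- pv_equiv track=rewrite | github.com/jiachunjin/ideal-octo-spork | runner/overfit_1024/sample_class.py | block_sequence_to_row_major
-- ===== SOURCE A (Python) =====
-- def block_sequence_to_row_major(sequence, n):
--     """
--     将2x2块排列的序列转换回行优先排列
--
--     Args:
--         sequence: 按2x2块排列的token序列
--         n: 网格的边长 (nxn grid)
--
--     Returns:
--         按行优先排列的token序列
--
--     Example:
--         输入: [1, 2, 5, 6, 3, 4, 7, 8, 9, 10, 13, 14, 11, 12, 15, 16], n=4
--         输出: [1, 2, 3, 4, 5, 6, 7, 8, 9, 10, 11, 12, 13, 14, 15, 16]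
--     """
--     if len(sequence) != n * n:
--         raise ValueError(f"序列长度 {len(sequence)} 与网格大小 {n}x{n} 不匹配")
--
--     if n % 2 != 0:
--         raise ValueError(f"网格边长 {n} 必须是偶数")
--
--     # 创建结果数组
--     result = [0] * (n * n)
--
--     # 计算每行/列有多少个2x2块
--     blocks_per_row = n // 2
--
--     # 遍历每个2x2块
--     block_idx = 0
--     for block_row in range(blocks_per_row):
--         for block_col in range(blocks_per_row):
--             # 每个2x2块包含4个元素
--             block_start = block_idx * 4
--
--             # 获取2x2块的4个元素
--             top_left = sequence[block_start]
--             top_right = sequence[block_start + 1]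
--             bottom_left = sequence[block_start + 2]
--             bottom_right = sequence[block_start + 3]
--
--             # 计算这些元素在原始网格中的位置
--             # 2x2块的左上角在原始网格中的位置
--             start_row = block_row * 2
--             start_col = block_col * 2
--
--             # 将元素放回原始位置
--             result[start_row * n + start_col] = top_left          # 左上
--             result[start_row * n + start_col + 1] = top_right     # 右上
--             result[(start_row + 1) * n + start_col] = bottom_left # 左下
--             result[(start_row + 1) * n + start_col + 1] = bottom_right # 右下
--
--             block_idx += 1
--
--     return result
-- ===== SOURCE B (Python) =====
-- def block_sequence_to_row_major(sequence, n):
--     if len(sequence) != n * n: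
--         raise ValueError(f"序列长度 {len(sequence)} 与网格大小 {n}x{n} 不匹配")
--     if n % 2 != 0:
--         raise ValueError(f"网格边长 {n} 必须是偶数")
--     half = n // 2
--     return [
--         sequence[(((i // n) // 2) * half + (i % n) // 2) * 4
--                  + ((i // n) % 2) * 2 + (i % n) % 2]
--         for i in range(n * n)
--     ]
-- ===== Notes on version B (the rewrite author's own statement) =====
-- stated objective: simpler
-- what changed: A scatters: it walks the 2x2 blocks and writes each block element into its row-major slot of a preallocated zero buffer; B gathers: a single list comprehension over row-major indices that reads each output cell directly from the block-ordered source, with no buffer and no in-place writes.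
-- outside the precondition, e.g. on block_sequence_to_row_major([0, 0, 0, 0], -2): A returns [0, 0, 0, 0], B raises IndexError
import Mathlib
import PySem

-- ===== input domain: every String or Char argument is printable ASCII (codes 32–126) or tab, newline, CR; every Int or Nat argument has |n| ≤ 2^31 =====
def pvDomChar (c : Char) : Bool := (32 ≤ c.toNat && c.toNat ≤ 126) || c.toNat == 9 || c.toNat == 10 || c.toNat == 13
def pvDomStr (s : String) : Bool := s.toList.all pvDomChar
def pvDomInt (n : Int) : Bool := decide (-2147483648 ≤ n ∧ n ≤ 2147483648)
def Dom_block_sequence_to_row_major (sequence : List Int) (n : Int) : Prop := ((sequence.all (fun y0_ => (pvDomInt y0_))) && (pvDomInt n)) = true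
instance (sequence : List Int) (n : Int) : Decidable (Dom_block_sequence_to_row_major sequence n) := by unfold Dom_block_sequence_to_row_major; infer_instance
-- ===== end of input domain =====

-- B replaces A's scatter loop (write each 2x2-block element into a zero buffer) by a gather
-- comprehension (read each row-major cell straight from the block-ordered source): simpler, same cost.


-- ===== PORT A =====
-- inner loop body of A (the `for block_col` body); state = (result, block_idx)
def pvAInner (sequence : List Int) (n blockRow : Int) (st : List Int × Int) (blockCol : Int) : List Int × Int :=
  let result := st.1
  let blockIdx := st.2
  let blockStart := blockIdx * 4
  -- all sequence reads / result writes are in range on every input admitted by Pre_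
  let topLeft := PySem.List.pyGetD sequence blockStart 0
  let topRight := PySem.List.pyGetD sequence (blockStart + 1) 0
  let bottomLeft := PySem.List.pyGetD sequence (blockStart + 2) 0
  let bottomRight := PySem.List.pyGetD sequence (blockStart + 3) 0
  let startRow := blockRow * 2
  let startCol := blockCol * 2
  let r := PySem.List.pySetD result (startRow * n + startCol) topLeft
  let r := PySem.List.pySetD r (startRow * n + startCol + 1) topRight
  let r := PySem.List.pySetD r ((startRow + 1) * n + startCol) bottomLeft
  let r := PySem.List.pySetD r ((startRow + 1) * n + startCol + 1) bottomRight
  (r, blockIdx + 1)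

-- outer loop body of A (the `for block_row` body)
def pvAOuter (sequence : List Int) (n : Int) (st : List Int × Int) (blockRow : Int) : List Int × Int :=
  (PySem.List.pyRange 0 (PySem.Int.floordiv n 2) 1).foldl (pvAInner sequence n blockRow) st

def block_sequence_to_row_major (sequence : List Int) (n : Int) : List Int :=
  if (sequence.length : Int) ≠ n * n then []            -- Python: raise ValueError (excluded by Pre_)
  else if PySem.Int.mod n 2 ≠ 0 then []                 -- Python: raise ValueError (excluded by Pre_)
  else
    let result := List.replicate (n * n).toNat (0 : Int)
    ((PySem.List.pyRange 0 (PySem.Int.floordiv n 2) 1).foldl (pvAOuter sequence n) (result, 0)).1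

-- ===== PORT B =====
-- the comprehension's per-cell expression: sequence[block*4 + offset] for row-major index i
def pvBCell (sequence : List Int) (n half i : Int) : Int :=
  PySem.List.pyGetD sequence
    ((PySem.Int.floordiv (PySem.Int.floordiv i n) 2 * half
      + PySem.Int.floordiv (PySem.Int.mod i n) 2) * 4
     + PySem.Int.mod (PySem.Int.floordiv i n) 2 * 2
     + PySem.Int.mod (PySem.Int.mod i n) 2) 0

def block_sequence_to_row_major_alt (sequence : List Int) (n : Int) : List Int :=
  if (sequence.length : Int) ≠ n * n then []            -- Python: raise ValueError (excluded by Pre_)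
  else if PySem.Int.mod n 2 ≠ 0 then []                 -- Python: raise ValueError (excluded by Pre_)
  else
    let half := PySem.Int.floordiv n 2
    (PySem.List.pyRange 0 (n * n) 1).map (pvBCell sequence n half)

-- ===== PRECONDITION & SPEC =====
-- Pre_ excludes the two ValueError inputs (length ≠ n*n, odd n) and additionally negative even n with
-- matching length, where A's loops never run and it returns the untouched all-zeros buffer — an
-- artefact of the preallocation — while B raises IndexError.
def Pre_block_sequence_to_row_major (sequence : List Int) (n : Int) : Prop :=
  (sequence.length : Int) = n * n ∧ n % 2 = 0 ∧ 0 ≤ n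
instance (sequence : List Int) (n : Int) : Decidable (Pre_block_sequence_to_row_major sequence n) := by
  unfold Pre_block_sequence_to_row_major; infer_instance

def pvWitness_block_sequence_to_row_major : List Int × Int := ([1, 2, 5, 6, 3, 4, 7, 8, 9, 10, 13, 14, 11, 12, 15, 16], 4)

def Spec_block_sequence_to_row_major (sequence : List Int) (n : Int) (out : List Int) : Prop := out = block_sequence_to_row_major_alt sequence n
instance (sequence : List Int) (n : Int) (out : List Int) : Decidable (Spec_block_sequence_to_row_major sequence n out) := by unfold Spec_block_sequence_to_row_major; infer_instance

-- ===== CLAIM (what is proved, stated in full; the proofs are below) =====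
def Claim_equal_block_sequence_to_row_major : Prop := ∀ (sequence : List Int) (n : Int), Dom_block_sequence_to_row_major sequence n → Pre_block_sequence_to_row_major sequence n → Spec_block_sequence_to_row_major sequence n (block_sequence_to_row_major sequence n)

-- ===== LEMMAS AND PROOFS =====

-- Nat-level value of B's cell for grid side n = 2*k, j a row-major index
def pvGather (seq : List Int) (k j : Nat) : Int :=
  seq.getD ((j / (2 * k) / 2 * k + j % (2 * k) / 2) * 4
            + j / (2 * k) % 2 * 2 + j % (2 * k) % 2) 0

-- Nat-level effect of one iteration of A's inner loop body
def pvWrites (seq : List Int) (k br bc idx : Nat) (res : List Int) : List Int :=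
  ((((res.set (br * 2 * (2 * k) + bc * 2) (seq.getD (idx * 4) 0)).set
       (br * 2 * (2 * k) + bc * 2 + 1) (seq.getD (idx * 4 + 1) 0)).set
       ((br * 2 + 1) * (2 * k) + bc * 2) (seq.getD (idx * 4 + 2) 0)).set
       ((br * 2 + 1) * (2 * k) + bc * 2 + 1) (seq.getD (idx * 4 + 3) 0))

-- flattened (single-index) form of A's double loop
def pvStep (seq : List Int) (k : Nat) (res : List Int) (t : Nat) : List Int :=
  pvWrites seq k (t / k) (t % k) t res

-- which 2x2 block the row-major index j belongs to
def pvBlockOf (k j : Nat) : Nat := j / (2 * k) / 2 * k + j % (2 * k) / 2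

lemma pv_fd2 (m : Nat) : PySem.Int.floordiv (m : Int) 2 = ((m / 2 : Nat) : Int) := by
  exact_mod_cast PySem.Int.floordiv_natCast m 2

lemma pv_md2 (m : Nat) : PySem.Int.mod (m : Int) 2 = ((m % 2 : Nat) : Int) := by
  exact_mod_cast PySem.Int.mod_natCast m 2

lemma pv_cell (seq : List Int) (k j : Nat) :
    pvBCell seq ((2 * k : Nat) : Int) ((k : Nat) : Int) (j : Int) = pvGather seq k j := by
  unfold pvBCell pvGather
  rw [PySem.Int.floordiv_natCast, PySem.Int.mod_natCast, pv_fd2, pv_md2, pv_fd2, pv_md2]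
  norm_cast
  rw [PySem.List.pyGetD_natCast]

lemma pv_inner_step (seq : List Int) (k br bc idx : Nat) (res : List Int) :
    pvAInner seq ((2 * k : Nat) : Int) (br : Int) (res, (idx : Int)) (bc : Int)
      = (pvWrites seq k br bc idx res, ((idx + 1 : Nat) : Int)) := by
  unfold pvAInner pvWrites
  simp only
  simp only [Prod.mk.injEq]
  refine ⟨?_, by push_cast; ring⟩
  norm_cast
  simp only [PySem.List.pySetD_natCast, PySem.List.pyGetD_natCast]

lemma pv_dm_unique (k q r : Nat) (hr : r < k) : (q * k + r) / k = q ∧ (q * k + r) % k = r := by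
  rw [Nat.mul_comm q k]
  constructor
  · rw [Nat.mul_add_div (by omega), Nat.div_eq_of_lt hr]; omega
  · rw [Nat.mul_add_mod, Nat.mod_eq_of_lt hr]

lemma pv_inner_fold (seq : List Int) (k br : Nat) :
    ∀ (c : Nat) (res : List Int) (idx : Nat),
      ((List.range c).map (Nat.cast : Nat → Int)).foldl (pvAInner seq ((2 * k : Nat) : Int) (br : Int)) (res, (idx : Int))
        = ((List.range c).foldl (fun r bc => pvWrites seq k br bc (idx + bc) r) res, ((idx + c : Nat) : Int)) := by
  intro c
  induction c with
  | zero => simp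
  | succ c ih =>
    intro res idx
    rw [List.range_succ]
    simp only [List.map_append, List.foldl_append, List.map_cons, List.map_nil,
      List.foldl_cons, List.foldl_nil, ih]
    rw [show ((idx + c : Nat) : Int) = (((idx + c : Nat) : Nat) : Int) from rfl, pv_inner_step]
    rw [show idx + c + 1 = idx + (c + 1) by ring]

lemma pv_outer_fold (seq : List Int) (k : Nat) :
    ∀ (c : Nat) (res : List Int),
      ((List.range c).map (Nat.cast : Nat → Int)).foldl (pvAOuter seq ((2 * k : Nat) : Int)) (res, ((0 : Nat) : Int))
        = ((List.range (c * k)).foldl (pvStep seq k) res, ((c * k : Nat) : Int)) := by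
  intro c
  induction c with
  | zero => intro res; simp
  | succ c ih =>
    intro res
    rw [List.range_succ]
    simp only [List.map_append, List.foldl_append, List.map_cons, List.map_nil,
      List.foldl_cons, List.foldl_nil, ih]
    unfold pvAOuter
    rw [show PySem.Int.floordiv ((2 * k : Nat) : Int) 2 = ((k : Nat) : Int) by
          rw [pv_fd2]; norm_num]
    rw [PySem.List.pyRange_zero_natCast]
    rw [pv_inner_fold seq k c k _ (c * k)]
    simp only [Prod.mk.injEq]
    refine ⟨?_, by rw [show c * k + k = (c + 1) * k by ring]⟩
    rw [show (c + 1) * k = c * k + k by ring, List.range_add, List.foldl_append,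
      List.foldl_map]
    apply List.foldl_ext
    intro r bc hbc
    rw [List.mem_range] at hbc
    unfold pvStep
    congr 1
    · rcases Nat.eq_zero_or_pos k with hk | hk
      · omega
      · rw [Nat.add_comm (c * k) bc, Nat.add_mul_div_right _ _ hk, Nat.div_eq_of_lt hbc]; omega
    · rcases Nat.eq_zero_or_pos k with hk | hk
      · omega
      · rw [Nat.add_comm (c * k) bc, Nat.add_mul_mod_self_right, Nat.mod_eq_of_lt hbc]

-- pvBlockOf / pvGather at a written position
lemma pv_cell_pos (seq : List Int) (k br bc dr dc c : Nat) (hbr : br < k) (hbc : bc < k)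
    (hdr : dr < 2) (hdc : dc < 2) (hc : br * k + bc = c) :
    pvBlockOf k ((br * 2 + dr) * (2 * k) + (bc * 2 + dc)) = c ∧
    pvGather seq k ((br * 2 + dr) * (2 * k) + (bc * 2 + dc)) = seq.getD (c * 4 + (dr * 2 + dc)) 0 := by
  have hdm := pv_dm_unique (2 * k) (br * 2 + dr) (bc * 2 + dc) (by omega)
  unfold pvBlockOf pvGather
  rw [hdm.1, hdm.2]
  have e1 : (br * 2 + dr) / 2 = br := by omega
  have e2 : (br * 2 + dr) % 2 = dr := by omega
  have e3 : (bc * 2 + dc) / 2 = bc := by omega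
  have e4 : (bc * 2 + dc) % 2 = dc := by omega
  rw [e1, e2, e3, e4, hc]
  exact ⟨rfl, by ring_nf⟩

-- a row-major index in block c is one of the four positions written at step c
lemma pv_pos_of_block (k j c : Nat) (hk : 0 < k) (hj : j < 4 * (k * k)) (hb : pvBlockOf k j = c) :
    ∃ dr dc, dr < 2 ∧ dc < 2 ∧ j = (c / k * 2 + dr) * (2 * k) + (c % k * 2 + dc) := by
  have hsplit := Nat.div_add_mod j (2 * k)
  have hcol : j % (2 * k) < 2 * k := Nat.mod_lt _ (by omega)
  unfold pvBlockOf at hb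
  have hdm := pv_dm_unique k (j / (2 * k) / 2) (j % (2 * k) / 2) (by omega)
  rw [hb] at hdm
  refine ⟨j / (2 * k) % 2, j % (2 * k) % 2, by omega, by omega, ?_⟩
  have h7 : c / k * 2 + j / (2 * k) % 2 = j / (2 * k) := by omega
  have h8 : c % k * 2 + j % (2 * k) % 2 = j % (2 * k) := by omega
  rw [h7, h8]
  linarith [hsplit]

lemma pv_block_lt (k j : Nat) (hk : 0 < k) (hj : j < 4 * (k * k)) : pvBlockOf k j < k * k := by
  obtain ⟨m, rfl⟩ : ∃ m, k = m + 1 := ⟨k - 1, by omega⟩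
  have hrow : j / (2 * (m + 1)) < 2 * (m + 1) :=
    Nat.div_lt_of_lt_mul (by linarith [hj])
  have hcol : j % (2 * (m + 1)) < 2 * (m + 1) := Nat.mod_lt _ (by omega)
  unfold pvBlockOf
  have h1 : j / (2 * (m + 1)) / 2 ≤ m := by omega
  have h2 : j % (2 * (m + 1)) / 2 ≤ m := by omega
  have h3 : j / (2 * (m + 1)) / 2 * (m + 1) ≤ m * (m + 1) := Nat.mul_le_mul_right _ h1
  nlinarith

lemma pv_invariant (seq : List Int) (k : Nat) :
    ∀ (c : Nat), c ≤ k * k →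
      (List.range c).foldl (pvStep seq k) (List.replicate (4 * (k * k)) (0 : Int))
        = (List.range (4 * (k * k))).map (fun j => if pvBlockOf k j < c then pvGather seq k j else 0) := by
  intro c
  induction c with
  | zero =>
    intro _
    simp only [List.range_zero, List.foldl_nil, Nat.not_lt_zero, if_false]
    rw [List.map_const', List.length_range]
  | succ c ih =>
    intro hc
    have hck : c < k * k := Nat.lt_of_succ_le hc
    have hk : 0 < k := by by_contra h; simp at h; subst h; simp at hck
    rw [List.range_succ, List.foldl_append, List.foldl_cons, List.foldl_nil, ih (by omega)]
    unfold pvStep pvWrites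
    set br := c / k with hbr
    set bc := c % k with hbc
    have hbrk : br < k := Nat.div_lt_of_lt_mul hck
    have hbck : bc < k := Nat.mod_lt _ hk
    have hcdm : br * k + bc = c := by
      rw [hbr, hbc, Nat.mul_comm]; exact Nat.div_add_mod c k
    have p00 := pv_cell_pos seq k br bc 0 0 c hbrk hbck (by omega) (by omega) hcdm
    have p01 := pv_cell_pos seq k br bc 0 1 c hbrk hbck (by omega) (by omega) hcdm
    have p10 := pv_cell_pos seq k br bc 1 0 c hbrk hbck (by omega) (by omega) hcdm
    have p11 := pv_cell_pos seq k br bc 1 1 c hbrk hbck (by omega) (by omega) hcdm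
    apply List.ext_getElem
    · simp
    · intro j h1 h2
      simp only [List.length_set, List.length_map, List.length_range] at h1
      simp only [List.getElem_set, List.getElem_map, List.getElem_range]
      have e00 : (br * 2 + 0) * (2 * k) + (bc * 2 + 0) = br * 2 * (2 * k) + bc * 2 := by ring
      have e01 : (br * 2 + 0) * (2 * k) + (bc * 2 + 1) = br * 2 * (2 * k) + bc * 2 + 1 := by ring
      have e10 : (br * 2 + 1) * (2 * k) + (bc * 2 + 0) = (br * 2 + 1) * (2 * k) + bc * 2 := by ring
      have e11 : (br * 2 + 1) * (2 * k) + (bc * 2 + 1) = (br * 2 + 1) * (2 * k) + bc * 2 + 1 := by ring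
      rw [e00] at p00; rw [e01] at p01; rw [e10] at p10; rw [e11] at p11
      by_cases h3 : (br * 2 + 1) * (2 * k) + bc * 2 + 1 = j
      · rw [if_pos h3, ← h3, if_pos (by rw [p11.1]; omega), p11.2]
      · rw [if_neg h3]
        by_cases h4 : (br * 2 + 1) * (2 * k) + bc * 2 = j
        · rw [if_pos h4, ← h4, if_pos (by rw [p10.1]; omega), p10.2]
        · rw [if_neg h4]
          by_cases h5 : br * 2 * (2 * k) + bc * 2 + 1 = j
          · rw [if_pos h5, ← h5, if_pos (by rw [p01.1]; omega), p01.2]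
          · rw [if_neg h5]
            by_cases h6 : br * 2 * (2 * k) + bc * 2 = j
            · rw [if_pos h6, ← h6, if_pos (by rw [p00.1]; omega), p00.2]; norm_num
            · rw [if_neg h6]
              have hne : pvBlockOf k j ≠ c := by
                intro hb
                obtain ⟨dr, dc, hdr, hdc, hj4⟩ := pv_pos_of_block k j c hk h1 hb
                rw [← hbr, ← hbc] at hj4
                interval_cases dr <;> interval_cases dc
                · exact h6 (by rw [hj4]; ring)
                · exact h5 (by rw [hj4]; ring)
                · exact h4 (by rw [hj4]; ring)
                · exact h3 (by rw [hj4]; ring)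
              by_cases hlt : pvBlockOf k j < c
              · rw [if_pos hlt, if_pos (by omega)]
              · rw [if_neg hlt, if_neg (by omega)]

-- ===== VERDICT (by name: the statement is the Claim_ definition above) =====
theorem block_sequence_to_row_major_spec : Claim_equal_block_sequence_to_row_major := by
  intro sequence n _ hpre
  obtain ⟨hlen, hmod, hnn⟩ := hpre
  obtain ⟨k, rfl⟩ : ∃ k : Nat, n = ((2 * k : Nat) : Int) := ⟨n.toNat / 2, by omega⟩
  have hlenN : sequence.length = 4 * (k * k) := by
    have h1 : (sequence.length : Int) = (((2 * k) * (2 * k) : Nat) : Int) := by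
      push_cast at hlen ⊢; linarith
    have h2 : sequence.length = (2 * k) * (2 * k) := by exact_mod_cast h1
    rw [h2]; ring
  unfold Spec_block_sequence_to_row_major block_sequence_to_row_major block_sequence_to_row_major_alt
  have hlenneg : ¬((sequence.length : Int) ≠ ((2 * k : Nat) : Int) * ((2 * k : Nat) : Int)) := by
    simp [hlen]
  have hmodneg : ¬(PySem.Int.mod ((2 * k : Nat) : Int) 2 ≠ 0) := by
    rw [pv_md2]; norm_num [Nat.mul_mod_right]
  rw [if_neg hlenneg, if_neg hmodneg, if_neg hlenneg, if_neg hmodneg]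
  simp only
  have hsq : ((2 * k : Nat) : Int) * ((2 * k : Nat) : Int) = ((4 * (k * k) : Nat) : Int) := by
    push_cast; ring
  have htn : (((2 * k : Nat) : Int) * ((2 * k : Nat) : Int)).toNat = 4 * (k * k) := by
    rw [hsq, Int.toNat_natCast]
  have hfd : PySem.Int.floordiv ((2 * k : Nat) : Int) 2 = ((k : Nat) : Int) := by
    rw [pv_fd2]; norm_num
  rw [htn, hsq, hfd, PySem.List.pyRange_zero_natCast, PySem.List.pyRange_zero_natCast]
  rw [show ((0 : Int) = ((0 : Nat) : Int)) from rfl]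
  rw [pv_outer_fold sequence k k _]
  simp only [Nat.cast_zero]
  rw [List.map_map]
  rw [pv_invariant sequence k (k * k) (le_refl _)]
  apply List.map_congr_left
  intro j hj
  rw [List.mem_range] at hj
  have hk : 0 < k := by
    rcases Nat.eq_zero_or_pos k with h | h
    · subst h; simp at hj
    · exact h
  rw [if_pos (pv_block_lt k j hk hj)]
  exact (pv_cell sequence k j).symm
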